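-- pv_equiv track=rewrite | github.com/hfhfn/AI_Resources | scripts/distribute_files.py | match_path_against_rule
-- ===== SOURCE A (Python) =====
-- def unescape_gitignore_rule(rule):
--     """Remove backslash escaping from a gitignore rule to recover the literal path."""
--     result = []
--     i = 0
--     while i < len(rule):
--         if rule[i] == '\\' and i + 1 < len(rule) and rule[i + 1] in ('\\', '*', '?', '[', ']', '#', '!', ' '):
--             result.append(rule[i + 1])
--             i += 2
--         else:
--             result.append(rule[i])
--             i += 1
--     return ''.join(result)
--
-- def is_pattern_rule(rule):
--     """Returns True if the rule contains unescaped wildcards (* or ?)."""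
--     i = 0
--     while i < len(rule):
--         if rule[i] == '\\' and i + 1 < len(rule):
--             i += 2  # Skip escaped character
--         elif rule[i] in ('*', '?'):
--             return True
--         else:
--             i += 1
--     return False
--
-- def match_path_against_rule(path, rule):
--     """Check if a path matches a gitignore rule (literal or pattern).
--
--     For literal rules: unescape and compare with ==.
--     For pattern rules: split on /, compare segment by segment, * matches any single segment.
--     """
--     if not is_pattern_rule(rule):
--         return path == unescape_gitignore_rule(rule)
--     # Pattern rule: split on / and compare segment by segment
--     path_parts = path.split('/')
--     rule_parts = rule.split('/')
--     if len(path_parts) != len(rule_parts):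
--         return False
--     for pp, rp in zip(path_parts, rule_parts):
--         if rp == '*':
--             continue  # Wildcard matches any single segment
--         if pp != unescape_gitignore_rule(rp):
--             return False
--     return True
-- ===== SOURCE B (Python) =====
-- def unescape_gitignore_rule(rule):
--     """Remove backslash escaping from a gitignore rule to recover the literal path."""
--     result = []
--     i = 0
--     while i < len(rule):
--         if rule[i] == '\\' and i + 1 < len(rule) and rule[i + 1] in ('\\', '*', '?', '[', ']', '#', '!', ' '):
--             result.append(rule[i + 1])
--             i += 2
--         else:
--             result.append(rule[i])
--             i += 1
--     return ''.join(result)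
--
-- def match_path_against_rule(path, rule):
--     """Check if a path matches a gitignore rule: one unified per-segment comparison."""
--     path_parts = path.split('/')
--     rule_parts = rule.split('/')
--     return len(path_parts) == len(rule_parts) and all(
--         rp == '*' or pp == unescape_gitignore_rule(rp)
--         for pp, rp in zip(path_parts, rule_parts))
-- ===== Notes on version B (the rewrite author's own statement) =====
-- stated objective: simpler
-- what changed: Drops the is_pattern_rule scanner and the literal-vs-pattern branch entirely: B always splits both strings on '/' and does one unified per-segment comparison ('*' or unescaped equality), which coincides with A's full-string literal compare because unescaping never touches '/' and a bare '*' segment only occurs in pattern rules.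
import Mathlib
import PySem

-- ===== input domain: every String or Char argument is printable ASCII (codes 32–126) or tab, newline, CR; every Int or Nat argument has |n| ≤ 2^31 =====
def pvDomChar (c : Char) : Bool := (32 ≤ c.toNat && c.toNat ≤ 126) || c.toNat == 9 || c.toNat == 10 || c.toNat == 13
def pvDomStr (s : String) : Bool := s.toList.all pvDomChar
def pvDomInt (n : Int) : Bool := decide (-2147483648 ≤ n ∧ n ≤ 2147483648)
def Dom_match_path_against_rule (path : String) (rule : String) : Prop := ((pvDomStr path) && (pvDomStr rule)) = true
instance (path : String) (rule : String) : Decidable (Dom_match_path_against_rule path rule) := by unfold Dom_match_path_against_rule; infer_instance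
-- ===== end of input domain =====

-- B drops A's is_pattern_rule scanner and literal-vs-pattern branch in favour of one unified
-- per-segment comparison; objective: simpler (same asymptotic cost).

-- ===== PORT A =====

-- unescape_gitignore_rule, on List Char (helper shared by both Pythons, verbatim in each)
def pvEscSet (c : Char) : Bool :=
  c == '\\' || c == '*' || c == '?' || c == '[' || c == ']' || c == '#' || c == '!' || c == ' '

def pvUnesc : List Char → List Char
  | '\\' :: c :: rest =>
      if pvEscSet c then c :: pvUnesc rest else '\\' :: pvUnesc (c :: rest)
  | c :: rest => c :: pvUnesc rest
  | [] => []

-- is_pattern_rule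
def pvIsPat : List Char → Bool
  | '\\' :: _ :: rest => pvIsPat rest
  | c :: rest => if c == '*' || c == '?' then true else pvIsPat rest
  | [] => false

-- A's pattern-branch for-loop (early return on the first failing pair)
def pvLoopA : List (List Char × List Char) → Bool
  | [] => true
  | (pp, rp) :: t =>
      if rp = ['*'] then pvLoopA t
      else if pp ≠ pvUnesc rp then false
      else pvLoopA t

def match_path_against_rule (path : String) (rule : String) : Bool :=
  if !pvIsPat rule.toList then
    path.toList == pvUnesc rule.toList
  else
    let pathParts := PySem.Chars.splitOn path.toList ['/']
    let ruleParts := PySem.Chars.splitOn rule.toList ['/']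
    if pathParts.length ≠ ruleParts.length then false
    else pvLoopA (pathParts.zip ruleParts)

-- ===== PORT B =====
def match_path_against_rule_alt (path : String) (rule : String) : Bool :=
  let pathParts := PySem.Chars.splitOn path.toList ['/']
  let ruleParts := PySem.Chars.splitOn rule.toList ['/']
  pathParts.length == ruleParts.length &&
    (pathParts.zip ruleParts).all (fun pr => pr.2 == ['*'] || pr.1 == pvUnesc pr.2)

-- ===== PRECONDITION & SPEC =====
def Spec_match_path_against_rule (path : String) (rule : String) (out : Bool) : Prop := out = match_path_against_rule_alt path rule
instance (path : String) (rule : String) (out : Bool) : Decidable (Spec_match_path_against_rule path rule out) := by unfold Spec_match_path_against_rule; infer_instance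

-- ===== CLAIM (what is proved, stated in full; the proofs are below) =====
def Claim_equal_match_path_against_rule : Prop := ∀ (path : String) (rule : String), Dom_match_path_against_rule path rule → Spec_match_path_against_rule path rule (match_path_against_rule path rule)

-- ===== LEMMAS AND PROOFS =====

-- simple recursive characterisation of s.split('/')
def pvConsHead (c : Char) : List (List Char) → List (List Char)
  | [] => [[c]]
  | h :: t => (c :: h) :: t

def pvSplitS : List Char → List (List Char)
  | [] => [[]]
  | c :: rest => if c = '/' then [] :: pvSplitS rest else pvConsHead c (pvSplitS rest)

def pvMapHead (f : List Char → List Char) : List (List Char) → List (List Char)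
  | [] => []
  | h :: t => f h :: t

theorem pvSplitS_ne_nil (cs : List Char) : pvSplitS cs ≠ [] := by
  cases cs with
  | nil => simp [pvSplitS]
  | cons c rest =>
    simp only [pvSplitS]
    split
    · simp
    · cases h : pvSplitS rest <;> simp [pvConsHead]

theorem pvSplitOn_go_spec (fuel : Nat) : ∀ (l cur : List Char) (acc : List (List Char)),
    l.length ≤ fuel →
    PySem.Chars.splitOn.go ['/'] fuel l cur acc
      = acc.reverse ++ pvMapHead (fun h => cur.reverse ++ h) (pvSplitS l) := by
  induction fuel with
  | zero =>
    intro l cur acc h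
    have hl : l = [] := by cases l <;> simp_all
    subst hl
    simp [PySem.Chars.splitOn.go, pvSplitS, pvMapHead]
  | succ n ih =>
    intro l cur acc h
    cases l with
    | nil => simp [PySem.Chars.splitOn.go, pvSplitS, pvMapHead]
    | cons c rest =>
      rw [PySem.Chars.splitOn.go]
      by_cases hc : c = '/'
      · subst hc
        rw [if_pos (by simp [List.isPrefixOf])]
        rw [show List.drop ['/'].length ('/' :: rest) = rest from rfl]
        rw [ih rest [] (cur.reverse :: acc) (by simpa using h)]
        cases hs : pvSplitS rest with
        | nil => exact absurd hs (pvSplitS_ne_nil rest)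
        | cons h0 t => simp [pvSplitS, pvMapHead, hs]
      · rw [if_neg (by simp [List.isPrefixOf]; exact fun e => hc e.symm)]
        rw [ih rest (c :: cur) acc (by simpa using h)]
        cases hs : pvSplitS rest with
        | nil => exact absurd hs (pvSplitS_ne_nil rest)
        | cons h0 t => simp [pvSplitS, hc, pvConsHead, pvMapHead, hs]

theorem pvSplitOn_eq (cs : List Char) :
    PySem.Chars.splitOn cs ['/'] = pvSplitS cs := by
  rw [PySem.Chars.splitOn]
  rw [pvSplitOn_go_spec (cs.length + 1) cs [] [] (by omega)]
  cases hs : pvSplitS cs with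
  | nil => exact absurd hs (pvSplitS_ne_nil cs)
  | cons h0 t => simp [pvMapHead]

-- join is a left inverse of pvSplitS, so pvSplitS is injective
def pvJoinS : List (List Char) → List Char
  | [] => []
  | [h] => h
  | h :: t => h ++ '/' :: pvJoinS t

theorem pvJoinS_consHead (c : Char) (l : List (List Char)) (hl : l ≠ []) :
    pvJoinS (pvConsHead c l) = c :: pvJoinS l := by
  cases l with
  | nil => exact absurd rfl hl
  | cons h t => cases t <;> simp [pvConsHead, pvJoinS]

theorem pvJoinS_splitS (cs : List Char) : pvJoinS (pvSplitS cs) = cs := by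
  induction cs with
  | nil => simp [pvSplitS, pvJoinS]
  | cons c rest ih =>
    by_cases hc : c = '/'
    · subst hc
      simp only [pvSplitS]
      cases hs : pvSplitS rest with
      | nil => exact absurd hs (pvSplitS_ne_nil rest)
      | cons h0 t =>
        rw [hs] at ih
        simp [pvJoinS, ih]
    · simp only [pvSplitS, if_neg hc]
      rw [pvJoinS_consHead c _ (pvSplitS_ne_nil rest), ih]

theorem pvSplitS_inj {xs ys : List Char} (h : pvSplitS xs = pvSplitS ys) : xs = ys := by
  have := congrArg pvJoinS h
  rwa [pvJoinS_splitS, pvJoinS_splitS] at this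

-- unescaping never touches '/', so it distributes over the split
theorem pvSplitS_cons_slash (rest : List Char) : pvSplitS ('/' :: rest) = [] :: pvSplitS rest := by
  simp [pvSplitS]

theorem pvSplitS_cons_ne {c : Char} (rest : List Char) (hc : ¬ c = '/') :
    pvSplitS (c :: rest) = pvConsHead c (pvSplitS rest) := by
  simp [pvSplitS, hc]

theorem pvSplitS_head (cs : List Char) :
    ∃ t, pvSplitS cs = (cs.takeWhile (fun x => !(x == '/'))) :: t := by
  induction cs with
  | nil => exact ⟨[], rfl⟩
  | cons c rest ih =>
    by_cases hc : c = '/'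
    · subst hc
      exact ⟨pvSplitS rest, by simp [pvSplitS_cons_slash]⟩
    · obtain ⟨t, ht⟩ := ih
      exact ⟨t, by
        rw [pvSplitS_cons_ne rest hc, ht, List.takeWhile_cons, if_pos (by simp [hc])]
        simp [pvConsHead]⟩

theorem pvUnesc_bs (c : Char) (rest : List Char) (hc : pvEscSet c = false) :
    pvUnesc ('\\' :: c :: rest) = '\\' :: pvUnesc (c :: rest) := by
  rw [pvUnesc.eq_1, if_neg (by simp [hc])]

theorem pvUnesc_bs_head (cs : List Char) (h : ∀ c t, cs = c :: t → pvEscSet c = false) :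
    pvUnesc ('\\' :: cs) = '\\' :: pvUnesc cs := by
  cases cs with
  | nil => decide
  | cons c t => exact pvUnesc_bs c t (h c t rfl)

theorem pvSplitS_unesc (cs : List Char) :
    pvSplitS (pvUnesc cs) = (pvSplitS cs).map pvUnesc := by
  fun_induction pvUnesc cs with
  | case1 c rest hesc ih =>
    have hc : ¬ c = '/' := by intro e; subst e; simp [pvEscSet] at hesc
    have hbs : ¬ ('\\' : Char) = '/' := by decide
    rw [pvSplitS_cons_ne _ hc, ih, pvSplitS_cons_ne _ hbs, pvSplitS_cons_ne _ hc]
    cases hs : pvSplitS rest with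
    | nil => exact absurd hs (pvSplitS_ne_nil rest)
    | cons h0 t =>
      simp only [pvConsHead, List.map_cons]
      congr 1
      rw [pvUnesc.eq_1, if_pos hesc]
  | case2 c rest hesc ih =>
    have hesc' : pvEscSet c = false := by simpa using hesc
    have hbs : ¬ ('\\' : Char) = '/' := by decide
    rw [pvSplitS_cons_ne _ hbs, ih, pvSplitS_cons_ne _ hbs]
    obtain ⟨t, ht⟩ := pvSplitS_head (c :: rest)
    rw [ht]
    simp only [pvConsHead, List.map_cons]
    congr 1
    rw [pvUnesc_bs_head]
    intro c1 t1 he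
    by_cases hc : c = '/'
    · subst hc
      rw [List.takeWhile_cons, if_neg (by simp)] at he
      exact absurd he (by simp)
    · rw [List.takeWhile_cons, if_pos (by simp [hc])] at he
      injection he with e1 _
      rw [← e1]
      exact hesc'
  | case3 c rest hne ih =>
    by_cases hc : c = '/'
    · subst hc
      rw [pvSplitS_cons_slash, pvSplitS_cons_slash, ih]
      simp [pvUnesc]
    · rw [pvSplitS_cons_ne _ hc, ih, pvSplitS_cons_ne _ hc]
      cases hs : pvSplitS rest with
      | nil => exact absurd hs (pvSplitS_ne_nil rest)
      | cons h0 t =>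
        simp only [pvConsHead, List.map_cons]
        congr 1
        by_cases hbs : c = '\\'
        · subst hbs
          cases rest with
          | nil =>
            rw [show pvSplitS ([] : List Char) = [[]] from rfl] at hs
            injection hs with e1 _
            rw [← e1]
            decide
          | cons a b => exact absurd rfl (hne a b rfl)
        · rw [pvUnesc.eq_2 c h0 (fun c1 r1 e _ => hbs e)]
  | case4 => simp [pvUnesc, pvSplitS]

-- a literal rule has no bare '*' segment
theorem pvStarNotMem : ∀ (n : Nat) (cs : List Char), cs.length ≤ n → pvIsPat cs = false →
    ∀ seg ∈ pvSplitS cs, seg ≠ ['*'] := by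
  intro n
  induction n with
  | zero =>
    intro cs h _ seg hseg
    have hcs : cs = [] := by cases cs <;> simp_all
    subst hcs
    simp [pvSplitS] at hseg
    subst hseg
    simp
  | succ n ih =>
    intro cs hlen hpat seg hseg
    cases cs with
    | nil =>
      simp [pvSplitS] at hseg
      subst hseg
      simp
    | cons c rest =>
      by_cases hbs : c = '\\'
      · subst hbs
        cases rest with
        | nil =>
          simp [pvSplitS, pvConsHead] at hseg
          subst hseg
          decide
        | cons c2 rest2 =>
          rw [pvIsPat.eq_1] at hpat
          have hbsne : ¬ ('\\' : Char) = '/' := by decide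
          simp only [pvSplitS, if_neg hbsne] at hseg
          by_cases hc2 : c2 = '/'
          · subst hc2
            simp [pvConsHead] at hseg
            rcases hseg with rfl | h
            · simp
            · exact ih rest2 (by simp at hlen; omega) hpat seg h
          · simp only [if_neg hc2] at hseg
            cases hs2 : pvSplitS rest2 with
            | nil => exact absurd hs2 (pvSplitS_ne_nil rest2)
            | cons h1 t1 =>
              rw [hs2] at hseg
              simp only [pvConsHead, List.mem_cons] at hseg
              rcases hseg with rfl | h
              · simp
              · exact ih rest2 (by simp at hlen; omega) hpat seg
                  (by rw [hs2]; exact List.mem_cons_of_mem _ h)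
      · rw [pvIsPat.eq_2 c rest (fun c1 r1 e _ => hbs e)] at hpat
        have hcstar : ¬ (c == '*' || c == '?') = true := by
          intro hcc; rw [if_pos hcc] at hpat; exact absurd hpat (by simp)
        rw [if_neg hcstar] at hpat
        have hcne : c ≠ '*' := by intro e; subst e; simp at hcstar
        by_cases hc : c = '/'
        · subst hc
          simp [pvSplitS] at hseg
          rcases hseg with rfl | h
          · simp
          · exact ih rest (by simp at hlen; omega) hpat seg h
        · simp only [pvSplitS, if_neg hc] at hseg
          cases hs : pvSplitS rest with
          | nil => exact absurd hs (pvSplitS_ne_nil rest)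
          | cons h0 t =>
            rw [hs] at hseg
            simp only [pvConsHead, List.mem_cons] at hseg
            rcases hseg with rfl | h
            · intro e
              injection e with e1 _
              exact hcne e1
            · exact ih rest (by simp at hlen; omega) hpat seg
                (by rw [hs]; exact List.mem_cons_of_mem _ h)

-- A's early-return loop is an `all`
theorem pvLoopA_eq_all (l : List (List Char × List Char)) :
    pvLoopA l = l.all (fun pr => pr.2 == ['*'] || pr.1 == pvUnesc pr.2) := by
  induction l with
  | nil => simp [pvLoopA]
  | cons p t ih =>
    obtain ⟨pp, rp⟩ := p
    by_cases h1 : rp = ['*']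
    · simp [pvLoopA, h1, ih]
    · by_cases h2 : pp = pvUnesc rp <;> simp [pvLoopA, h1, h2, ih]

-- length check + zipped per-pair equality against a mapped list IS list equality
theorem pvZipAllMap (g : List Char → List Char) :
    ∀ (xs ys : List (List Char)),
      (xs.length == ys.length && (xs.zip ys).all (fun pr => pr.1 == g pr.2))
        = (xs == ys.map g) := by
  intro xs
  induction xs with
  | nil => intro ys; cases ys <;> simp
  | cons x xt ih =>
    intro ys
    cases ys with
    | nil => simp
    | cons y yt =>
      simp only [List.length_cons, List.zip_cons_cons, List.all_cons, List.map_cons,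
        List.cons_beq_cons]
      rw [← ih yt]
      cases hx : (x == g y) <;> cases hl : (xt.length == yt.length) <;>
        simp_all
      exact fun e => by simp [e] at hl

theorem pvAll_no_star (l : List (List Char × List Char))
    (h : ∀ pr ∈ l, pr.2 ≠ ['*']) :
    l.all (fun pr => pr.2 == ['*'] || pr.1 == pvUnesc pr.2)
      = l.all (fun pr => pr.1 == pvUnesc pr.2) := by
  induction l with
  | nil => rfl
  | cons p t ih =>
    simp only [List.all_cons]
    rw [ih (fun pr hpr => h pr (List.mem_cons_of_mem _ hpr))]
    have hp : (p.2 == ['*']) = false := by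
      simpa using h p (List.mem_cons_self ..)
    rw [hp, Bool.false_or]

-- ===== VERDICT (by name: the statement is the Claim_ definition above) =====
theorem match_path_against_rule_spec : Claim_equal_match_path_against_rule := by
  intro path rule _
  unfold Spec_match_path_against_rule
  unfold match_path_against_rule match_path_against_rule_alt
  simp only [pvSplitOn_eq]
  by_cases hpat : pvIsPat rule.toList = true
  · -- pattern branch of A is exactly B's unified comparison
    rw [if_neg (by simp [hpat])]
    rw [pvLoopA_eq_all]
    by_cases hl : (pvSplitS path.toList).length = (pvSplitS rule.toList).length
    · simp [hl]
    · simp [hl]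
  · -- literal branch: the full-string compare decomposes segmentwise
    rw [if_pos (by simp_all)]
    rw [pvAll_no_star _ (fun pr hpr =>
      pvStarNotMem rule.toList.length rule.toList le_rfl (by simpa using hpat) pr.2
        (List.of_mem_zip hpr).2)]
    rw [pvZipAllMap pvUnesc]
    rw [← pvSplitS_unesc]
    have hiff : (pvSplitS path.toList == pvSplitS (pvUnesc rule.toList))
        = (path.toList == pvUnesc rule.toList) := by
      cases h : (path.toList == pvUnesc rule.toList) with
      | true =>
        rw [beq_iff_eq] at h
        simp [h]
      | false =>
        apply Bool.eq_false_iff.mpr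
        intro hc
        rw [beq_iff_eq] at hc
        have := pvSplitS_inj hc
        rw [Bool.eq_false_iff, ne_eq, beq_iff_eq] at h
        exact h this
    rw [hiff]
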